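-- pv_equiv track=rewrite | github.com/koskinenno-bot/Accounting-Autopilot | Accounting AI_v2 better/backend/services/reconciliation_service.py | is_valid_finnish_reference
-- ===== SOURCE A (Python) =====
-- def is_valid_finnish_reference(ref: str) -> bool:
--     """Mathematical validation for Finnish 7-3-1 reference numbers."""
--     ref = ref.strip().replace(" ", "")
--     if not ref.isdigit() or not (4 <= len(ref) <= 20):
--         return False
--
--     base = ref[:-1]
--     expected_check = int(ref[-1])
--
--     weights = [7, 3, 1]
--     total_sum = 0
--     # Multiply from right to left
--     for i, digit in enumerate(reversed(base)):
--         total_sum += int(digit) * weights[i % 3]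
--
--     calculated_check = (10 - (total_sum % 10)) % 10
--     return calculated_check == expected_check
-- ===== SOURCE B (Python) =====
-- def is_valid_finnish_reference(ref: str) -> bool:
--     """Finnish 7-3-1 check: recursively consume the reversed digit string three
--     digits at a time, each chunk weighted (1, 7, 3); the grand total must be
--     divisible by 10 (the check digit is just the first digit of the first chunk)."""
--     ref = ref.strip().replace(" ", "")
--     if not ref.isdigit() or not (4 <= len(ref) <= 20):
--         return False
--
--     def wsum(ds):
--         if not ds:
--             return 0
--         d1 = ds[1] if len(ds) > 1 else 0
--         d2 = ds[2] if len(ds) > 2 else 0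
--         return ds[0] + 7 * d1 + 3 * d2 + wsum(ds[3:])
--
--     return wsum([int(c) for c in ref[::-1]]) % 10 == 0
-- ===== Notes on version B (the rewrite author's own statement) =====
-- stated objective: alternative
-- what changed: B replaces A's enumerated reversed pass with an i%3-indexed weight table and reconstruction of the expected check digit by a recursive function that consumes the reversed digit list three digits per call with the fixed chunk weights (1,7,3) and tests the grand total (check digit included) for divisibility by 10.
import Mathlib
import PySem

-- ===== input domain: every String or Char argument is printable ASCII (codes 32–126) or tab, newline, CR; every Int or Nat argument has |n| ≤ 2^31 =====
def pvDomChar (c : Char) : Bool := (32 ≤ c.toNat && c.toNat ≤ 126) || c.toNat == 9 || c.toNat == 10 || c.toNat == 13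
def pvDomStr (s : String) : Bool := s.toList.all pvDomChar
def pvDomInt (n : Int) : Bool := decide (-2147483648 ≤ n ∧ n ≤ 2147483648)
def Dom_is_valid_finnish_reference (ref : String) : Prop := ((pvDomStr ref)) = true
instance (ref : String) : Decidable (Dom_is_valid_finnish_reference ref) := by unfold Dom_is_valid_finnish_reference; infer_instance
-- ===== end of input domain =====

-- B replaces A's enumerated reversed pass (weight table indexed by i % 3, expected
-- check digit reconstructed and compared) by a recursion consuming the reversed
-- digit list three digits per call with fixed chunk weights (1,7,3), testing the
-- grand total (check digit included) for divisibility by 10.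

-- ===== PORT A =====
def is_valid_finnish_reference (ref : String) : Bool :=
  let r := PySem.Str.replace (PySem.Str.strip ref) " " ""
  if !PySem.Str.strIsdigit r || !(decide (4 ≤ PySem.Str.len r) && decide (PySem.Str.len r ≤ 20)) then
    false
  else
    let base := PySem.Str.slice r none (some (-1))
    let expected_check : Int := (PySem.Int.ofChars? [(PySem.Str.pyGet? r (-1)).getD '0']).getD 0
    let weights : List Int := [7, 3, 1]
    let total_sum := (PySem.List.enumerate base.toList.reverse 0).foldl
      (fun acc p => acc + (PySem.Int.ofChars? [p.2]).getD 0 * PySem.List.pyGetD weights (PySem.Int.mod p.1 3) 0) 0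
    let calculated_check := PySem.Int.mod (10 - PySem.Int.mod total_sum 10) 10
    calculated_check == expected_check

-- ===== PORT B =====
-- helper of Source B: recursive 3-digit-chunk weighted sum over the reversed digit list
def wsumB : List Int → Int
  | [] => 0
  | d0 :: tl =>
    let ds := d0 :: tl
    let d1 := if 1 < ds.length then (PySem.List.pyGet? ds 1).getD 0 else 0
    let d2 := if 2 < ds.length then (PySem.List.pyGet? ds 2).getD 0 else 0
    d0 + 7 * d1 + 3 * d2 + wsumB (PySem.List.slice ds (some 3) none)
termination_by ds => ds.length
decreasing_by
  simp [PySem.List.slice_from]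

def is_valid_finnish_reference_alt (ref : String) : Bool :=
  let r := PySem.Str.replace (PySem.Str.strip ref) " " ""
  if !PySem.Str.strIsdigit r || !(decide (4 ≤ PySem.Str.len r) && decide (PySem.Str.len r ≤ 20)) then
    false
  else
    let digits := ((PySem.Str.slice? r none none (-1)).getD "").toList.map
      (fun c => (PySem.Int.ofChars? [c]).getD 0)
    PySem.Int.mod (wsumB digits) 10 == 0

-- ===== PRECONDITION & SPEC =====
def Spec_is_valid_finnish_reference (ref : String) (out : Bool) : Prop := out = is_valid_finnish_reference_alt ref
instance (ref : String) (out : Bool) : Decidable (Spec_is_valid_finnish_reference ref out) := by unfold Spec_is_valid_finnish_reference; infer_instance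

-- ===== CLAIM (what is proved, stated in full; the proofs are below) =====
def Claim_equal_is_valid_finnish_reference : Prop := ∀ (ref : String), Dom_is_valid_finnish_reference ref → Spec_is_valid_finnish_reference ref (is_valid_finnish_reference ref)

-- ===== LEMMAS AND PROOFS =====

-- weight of a digit at distance k from the right end of the full reference
def wB (k : Nat) : Int := [1, 7, 3].getD (k % 3) 0

-- positional weighted sum of an Int list, head at distance k from the right
def sumI : List Int → Nat → Int
  | [], _ => 0
  | d :: ds, k => d * wB k + sumI ds (k + 1)

-- same, over chars via their digit value (A's side)
def sumW : List Char → Nat → Int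
  | [], _ => 0
  | d :: ds, k => (PySem.Int.ofChars? [d]).getD 0 * wB k + sumW ds (k + 1)

theorem wB_add3 (k : Nat) : wB (k + 3) = wB k := by
  simp [wB]

theorem sumI_add3 (ds : List Int) (k : Nat) : sumI ds (k + 3) = sumI ds k := by
  induction ds generalizing k with
  | nil => rfl
  | cons d ds ih =>
    simp only [sumI, wB_add3]
    have : k + 3 + 1 = (k + 1) + 3 := by omega
    rw [this, ih]

theorem sumI_map (cs : List Char) (k : Nat) :
    sumI (cs.map (fun c => (PySem.Int.ofChars? [c]).getD 0)) k = sumW cs k := by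
  induction cs generalizing k with
  | nil => rfl
  | cons c cs ih => simp only [List.map_cons, sumI, sumW, ih]

theorem wsumB_eq (ds : List Int) : wsumB ds = sumI ds 0 := by
  match ds with
  | [] => unfold wsumB; rfl
  | [a] =>
    unfold wsumB
    simp [PySem.List.slice_from, wsumB, sumI, wB]
  | [a, b] =>
    unfold wsumB
    simp [PySem.List.slice_from, wsumB, PySem.List.pyGet?, PySem.List.pyIdx?, sumI, wB]
    ring_nf
  | a :: b :: c :: tl =>
    have hrec := wsumB_eq tl
    have h3 : sumI tl 3 = sumI tl 0 := by
      have := sumI_add3 tl 0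
      simpa using this
    have h1 : (0:Int) ≤ (tl.length : Int) + 1 := by omega
    have h2 : (2:Int) ≤ (tl.length : Int) + 1 + 1 := by omega
    unfold wsumB
    simp [PySem.List.slice_from, PySem.List.pyGet?, PySem.List.pyIdx?,
      hrec, sumI, wB, h3]
    rw [if_pos h1, if_pos h2]
    simp
    ring

theorem sumA_eq (ds : List Char) (acc : Int) (j : Nat) :
    (PySem.List.enumerate ds (j : Int)).foldl
      (fun acc p => acc + (PySem.Int.ofChars? [p.2]).getD 0 *
        PySem.List.pyGetD ([7, 3, 1] : List Int) (PySem.Int.mod p.1 3) 0) acc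
    = acc + sumW ds (j + 1) := by
  induction ds generalizing acc j with
  | nil => simp [PySem.List.enumerate_nil, sumW]
  | cons d ds ih =>
    rw [PySem.List.enumerate_cons]
    simp only [List.foldl_cons]
    have hc : (j : Int) + 1 = ((j + 1 : Nat) : Int) := by push_cast; ring
    rw [hc, ih]
    have hw : PySem.List.pyGetD ([7, 3, 1] : List Int) (PySem.Int.mod (j : Int) 3) 0 = wB (j + 1) := by
      have hm : PySem.Int.mod (j : Int) 3 = ((j % 3 : Nat) : Int) := by
        rw [PySem.Int.mod_eq_emod_of_pos (b := 3) (by norm_num)]; omega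
      rw [hm, PySem.List.pyGetD_natCast]
      have h : j % 3 = 0 ∨ j % 3 = 1 ∨ j % 3 = 2 := by omega
      have h1 : (j + 1) % 3 = (j % 3 + 1) % 3 := by omega
      rcases h with h | h | h <;> simp [wB, h, h1]
    simp only [hw, sumW]
    ring

theorem digit_bounds (c : Char) (h : PySem.Chars.isdigit c = true) :
    0 ≤ (PySem.Int.ofChars? [c]).getD 0 ∧ (PySem.Int.ofChars? [c]).getD 0 ≤ 9 := by
  unfold PySem.Chars.isdigit at h
  simp only [Bool.and_eq_true, decide_eq_true_eq] at h
  obtain ⟨h1, h2⟩ := h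
  have hlo : (48 : Nat) ≤ c.toNat := h1
  have hhi : c.toNat ≤ 57 := h2
  have hc := Char.ofNat_toNat c
  interval_cases hn : c.toNat <;> (rw [← hc]; decide)

-- ===== VERDICT (by name: the statement is the Claim_ definition above) =====
theorem is_valid_finnish_reference_spec : Claim_equal_is_valid_finnish_reference := by
  intro ref _
  unfold Spec_is_valid_finnish_reference
  unfold is_valid_finnish_reference is_valid_finnish_reference_alt
  set r := PySem.Str.replace (PySem.Str.strip ref) " " "" with hr
  by_cases hg : (!PySem.Str.strIsdigit r || !(decide (4 ≤ PySem.Str.len r) && decide (PySem.Str.len r ≤ 20))) = true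
  · simp only [hg, if_true]
  · simp only [hg, Bool.false_eq_true, if_false]
    simp only [Bool.or_eq_true, Bool.not_eq_true', not_or, Bool.not_eq_false] at hg
    obtain ⟨hdig, _⟩ := hg
    rw [PySem.Str.strIsdigit_eq] at hdig
    have hdig' := hdig
    unfold PySem.Chars.strIsdigit at hdig'
    simp only [Bool.and_eq_true, List.isEmpty_eq_false_iff, Bool.not_eq_true',
      List.all_eq_true] at hdig'
    obtain ⟨hne, hall⟩ := hdig'
    have hne : r.toList ≠ [] := by
      intro h; rw [h] at hne; simp at hne
    -- the last (check) digit
    have hlastget : PySem.Str.pyGet? r (-1) = some (r.toList.getLast hne) := by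
      simp [PySem.List.pyGet?_neg_one, List.getLast?_eq_some_getLast hne]
    rw [hlastget]
    simp only [Option.getD_some]
    have hrev : r.toList.reverse = r.toList.getLast hne :: r.toList.dropLast.reverse := by
      conv_lhs => rw [← List.dropLast_append_getLast hne]
      simp
    -- A's sum over base
    rw [PySem.Str.slice_to_neg_one]
    have hA := sumA_eq r.toList.dropLast.reverse 0 0
    rw [Nat.cast_zero] at hA
    rw [hA]
    -- B's sum over the whole reversed reference
    rw [PySem.Str.slice?_none_none_neg_one]
    simp only [Option.getD_some]
    have htl : (String.ofList r.toList.reverse).toList = r.toList.reverse := by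
      simp
    rw [htl, hrev]
    simp only [List.map_cons]
    rw [wsumB_eq]
    simp only [sumI, sumI_map]
    have hwB0 : wB 0 = 1 := by decide
    rw [hwB0]
    -- arithmetic: (10 - S % 10) % 10 = e  ↔  (e*1 + S) % 10 = 0, for 0 ≤ e ≤ 9
    have hcd : PySem.Chars.isdigit (r.toList.getLast hne) = true :=
      hall _ (List.getLast_mem hne)
    obtain ⟨he0, he9⟩ := digit_bounds _ hcd
    set e := (PySem.Int.ofChars? [r.toList.getLast hne]).getD 0
    set S := sumW r.toList.dropLast.reverse 1
    rw [Bool.eq_iff_iff]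
    simp only [beq_iff_eq]
    rw [PySem.Int.mod_eq_emod_of_pos (by norm_num : (0:Int) < 10),
        PySem.Int.mod_eq_emod_of_pos (by norm_num : (0:Int) < 10),
        PySem.Int.mod_eq_emod_of_pos (by norm_num : (0:Int) < 10)]
    omega
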